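-- pv_equiv track=rewrite | github.com/mrtozner/omnimemory | omnimemory-agent-memory/user_preferences.py | _shorten_response
-- ===== SOURCE A (Python) =====
-- def _shorten_response(response: str) -> str:
--     """Shorten a response for concise communication style"""
--     lines = response.split("\n")
--
--     # Remove extra explanations
--     filtered_lines = []
--     skip_next = False
--
--     for line in lines:
--         if skip_next:
--             skip_next = False
--             continue
--
--         # Skip explanation paragraphs
--         if any(
--             word in line.lower() for word in ["note:", "explanation:", "details:"]
--         ):
--             skip_next = True
--             continue
--
--         # Keep essential lines
--         if line.strip():
--             filtered_lines.append(line)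
--
--     return "\n".join(filtered_lines[:10])  # Limit to 10 lines
-- ===== SOURCE B (Python) =====
-- def _shorten_response(response: str) -> str:
--     """Shorten a response for concise communication style"""
--     lines = response.split("\n")
--     keywords = ("note:", "explanation:", "details:")
--     # Pass 1: build the set of banned indices (keyword lines and their followers).
--     banned = set()
--     for i, line in enumerate(lines):
--         if i not in banned and any(w in line.lower() for w in keywords):
--             banned.add(i)
--             banned.add(i + 1)
--     # Pass 2: stateless comprehension keeps non-banned, non-blank lines.
--     kept = [line for i, line in enumerate(lines) if i not in banned and line.strip()]
--     return "\n".join(kept[:10])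
-- ===== Notes on version B (the rewrite author's own statement) =====
-- stated objective: alternative
-- what changed: Replaces A's single stateful pass with the skip_next flag by two staged passes: a marking pass that builds a set of banned line indices (keyword lines and their followers), then a stateless comprehension that filters by index-set membership and blankness.
import Mathlib
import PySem

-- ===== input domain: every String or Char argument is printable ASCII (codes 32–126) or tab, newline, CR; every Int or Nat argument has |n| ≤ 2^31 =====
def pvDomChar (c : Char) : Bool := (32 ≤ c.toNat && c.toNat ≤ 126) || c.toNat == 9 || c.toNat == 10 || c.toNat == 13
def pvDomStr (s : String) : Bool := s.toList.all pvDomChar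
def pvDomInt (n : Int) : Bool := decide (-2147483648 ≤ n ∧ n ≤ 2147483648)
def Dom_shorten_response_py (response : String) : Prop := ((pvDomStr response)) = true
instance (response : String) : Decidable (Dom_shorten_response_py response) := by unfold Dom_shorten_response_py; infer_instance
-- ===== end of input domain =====

-- B replaces A's single stateful pass (skip_next flag) by two staged passes: a marking pass
-- that builds the set of banned indices, then a stateless comprehension filter; return value only.

-- ===== PORT A =====
-- any(word in line.lower() for word in ["note:", "explanation:", "details:"])
def aHasKeyword (line : String) : Bool :=
  (["note:", "explanation:", "details:"] : List String).any
    (fun word => PySem.Str.isIn word (PySem.Str.lower line))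

-- one iteration of A's for-loop over state (skip_next, filtered_lines)
def aStep : (Bool × List String) → String → (Bool × List String)
  | (true, acc), _ => (false, acc)
  | (false, acc), line =>
    if aHasKeyword line then (true, acc)
    else if PySem.Str.strip line ≠ "" then (false, acc ++ [line])
    else (false, acc)

def shorten_response_py (response : String) : String :=
  -- split? is none only for sep = ""; sep here is the literal "\n", so getD is unreachable
  let lines := (PySem.Str.split? response "\n").getD []
  let filtered := (lines.foldl aStep (false, [])).2
  PySem.Str.join "\n" (PySem.List.slice filtered none (some 10))

-- ===== PORT B =====
def bHasKeyword (line : String) : Bool :=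
  (["note:", "explanation:", "details:"] : List String).any
    (fun w => PySem.Str.isIn w (PySem.Str.lower line))

-- pass 1 body: if i not in banned and any(...): banned.add(i); banned.add(i+1)
def bMarkStep (banned : PySem.Set Int) (p : Int × String) : PySem.Set Int :=
  if ¬ PySem.Set.contains banned p.1 ∧ bHasKeyword p.2 then
    PySem.Set.add (PySem.Set.add banned p.1) (p.1 + 1)
  else banned

def shorten_response_py_alt (response : String) : String :=
  -- split? is none only for sep = ""; sep here is the literal "\n", so getD is unreachable
  let lines := (PySem.Str.split? response "\n").getD []
  let banned := (PySem.List.enumerate lines).foldl bMarkStep PySem.Set.empty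
  let kept := ((PySem.List.enumerate lines).filter
      (fun p => !PySem.Set.contains banned p.1 && !(PySem.Str.strip p.2 == ""))).map (·.2)
  PySem.Str.join "\n" (PySem.List.slice kept none (some 10))

-- ===== PRECONDITION & SPEC =====
def Spec_shorten_response_py (response : String) (out : String) : Prop := out = shorten_response_py_alt response
instance (response : String) (out : String) : Decidable (Spec_shorten_response_py response out) := by unfold Spec_shorten_response_py; infer_instance

-- ===== CLAIM (what is proved, stated in full; the proofs are below) =====
def Claim_equal_shorten_response_py : Prop := ∀ (response : String), Dom_shorten_response_py response → Spec_shorten_response_py response (shorten_response_py response)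

-- ===== LEMMAS AND PROOFS =====
-- Common specification list: the lines both programs keep, with b = "current line is skipped".
def specCollect : Bool → List String → List String
  | _, [] => []
  | true, _ :: r => specCollect false r
  | false, l :: r =>
    if aHasKeyword l then specCollect true r
    else if PySem.Str.strip l = "" then specCollect false r
    else l :: specCollect false r

-- A's fold with the skip_next flag computes exactly specCollect.
theorem foldA_eq (ls : List String) :
    ∀ (b : Bool) (acc : List String), (ls.foldl aStep (b, acc)).2 = acc ++ specCollect b ls := by
  induction ls with
  | nil => intro b acc; cases b <;> simp [specCollect]
  | cons l r ih =>
    intro b acc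
    cases b with
    | true => simp [aStep, specCollect, ih]
    | false =>
      by_cases hk : aHasKeyword l
      · simp [aStep, hk, specCollect, ih]
      · by_cases hs : PySem.Str.strip l = ""
        · simp [aStep, hk, hs, specCollect, ih]
        · simp [aStep, hk, hs, specCollect, ih]

-- The indices B's marking pass appends beyond an initial banned set.
def newB : Int → Bool → List String → List Int
  | _, _, [] => []
  | n, true, _ :: r => newB (n + 1) false r
  | n, false, l :: r =>
    if aHasKeyword l then n :: (n + 1) :: newB (n + 1) true r
    else newB (n + 1) false r

theorem newB_ge (ls : List String) : ∀ (n : Int) (b : Bool) (j : Int), j ∈ newB n b ls → n ≤ j := by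
  induction ls with
  | nil => intro n b j h; simp [newB] at h
  | cons l r ih =>
    intro n b j h
    cases b with
    | true => have := ih (n + 1) false j (by simpa [newB] using h); omega
    | false =>
      by_cases hk : aHasKeyword l
      · simp [newB, hk] at h
        rcases h with h | h | h
        · omega
        · omega
        · have := ih (n + 1) true j h; omega
      · have := ih (n + 1) false j (by simpa [newB, hk] using h); omega

-- The marking fold appends exactly newB.
theorem markFold_eq (ls : List String) :
    ∀ (n : Int) (b : Bool) (S : List Int),
      (∀ j ∈ S, j ≤ n) → (n ∈ S ↔ b = true) →
      (PySem.List.enumerate ls n).foldl bMarkStep S = S ++ newB n b ls := by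
  induction ls with
  | nil => intro n b S _ _; simp [newB]
  | cons l r ih =>
    intro n b S hle hmem
    have hnext : (n + 1) ∉ S := fun h => by have := hle _ h; omega
    cases b with
    | true =>
      have hn : n ∈ S := hmem.mpr rfl
      rw [PySem.List.enumerate_cons]
      simp only [List.foldl_cons, bMarkStep, PySem.Set.contains]
      rw [if_neg (by simp [hn])]
      rw [ih (n + 1) false S (fun j hj => by have := hle j hj; omega) (by simp [hnext])]
      simp [newB]
    | false =>
      have hn : n ∉ S := fun h => by simpa using hmem.mp h
      rw [PySem.List.enumerate_cons]
      simp only [List.foldl_cons, bMarkStep, PySem.Set.contains]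
      by_cases hk : bHasKeyword l
      · rw [if_pos (by simp [hn, hk])]
        have hadd1 : PySem.Set.add S n = S ++ [n] := by
          simp [PySem.Set.add, PySem.Set.contains, hn]
        have hadd2 : PySem.Set.add (S ++ [n]) (n + 1) = S ++ [n, n + 1] := by
          have : (n + 1) ∉ S ++ [n] := by
            intro h
            rcases List.mem_append.mp h with h | h
            · exact hnext h
            · simp at h
          simp [PySem.Set.add, PySem.Set.contains, this]
        rw [hadd1, hadd2,
          ih (n + 1) true (S ++ [n, n + 1])
            (by intro j hj; simp at hj; rcases hj with hj | hj | hj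
                · have := hle j hj; omega
                · omega
                · omega)
            (by simp [hnext])]
        have hk' : aHasKeyword l = true := hk
        simp [newB, hk']
      · rw [if_neg (by simp [hk])]
        rw [ih (n + 1) false S (fun j hj => by have := hle j hj; omega) (by simp [hnext])]
        have hk' : aHasKeyword l = false := by simpa using hk
        simp [newB, hk']

-- B's stateless filter pass, run against any set matching newB from n on, yields specCollect.
theorem filterB_eq (ls : List String) :
    ∀ (n : Int) (b : Bool) (S : List Int),
      (∀ j : Int, n ≤ j → (j ∈ S ↔ ((b = true ∧ j = n) ∨ j ∈ newB n b ls))) →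
      ((PySem.List.enumerate ls n).filter
          (fun p => !decide (p.1 ∈ S) && !(PySem.Str.strip p.2 == ""))).map (·.2)
        = specCollect b ls := by
  induction ls with
  | nil => intro n b S _; simp [specCollect]
  | cons l r ih =>
    intro n b S hS
    rw [PySem.List.enumerate_cons, List.filter_cons]
    cases b with
    | true =>
      have hn : n ∈ S := (hS n le_rfl).mpr (Or.inl ⟨rfl, rfl⟩)
      have hc : (!decide (((n : Int), l).1 ∈ S) && !(PySem.Str.strip ((n : Int), l).2 == "")) = false := by
        simp [hn]
      rw [hc]
      simp only [Bool.false_eq_true, if_false]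
      rw [ih (n + 1) false S (fun j hj => by
        have h := hS j (by omega)
        constructor
        · intro hjS
          rcases h.mp hjS with ⟨_, hje⟩ | hjn
          · omega
          · simpa [newB] using hjn
        · intro hjn
          exact h.mpr (Or.inr (by simpa [newB] using hjn)))]
      simp [specCollect]
    | false =>
      by_cases hk : aHasKeyword l
      · have hn : n ∈ S := (hS n le_rfl).mpr (Or.inr (by simp [newB, hk]))
        have hc : (!decide (((n : Int), l).1 ∈ S) && !(PySem.Str.strip ((n : Int), l).2 == "")) = false := by
          simp [hn]
        rw [hc]
        simp only [Bool.false_eq_true, if_false]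
        rw [ih (n + 1) true S (fun j hj => by
          have h := hS j (by omega)
          constructor
          · intro hjS
            rcases h.mp hjS with ⟨hb, _⟩ | hjn
            · exact absurd hb (by simp)
            · simp [newB, hk] at hjn
              rcases hjn with hjn | hjn | hjn
              · omega
              · exact Or.inl ⟨rfl, hjn⟩
              · exact Or.inr hjn
          · intro hjn
            rcases hjn with ⟨_, hje⟩ | hjn
            · exact h.mpr (Or.inr (by simp [newB, hk, hje]))
            · exact h.mpr (Or.inr (by simp [newB, hk, hjn])))]
        simp [specCollect, hk]
      · have hn : n ∉ S := by
          intro h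
          rcases (hS n le_rfl).mp h with ⟨hb, _⟩ | hjn
          · exact absurd hb (by simp)
          · simp [newB, hk] at hjn
            have := newB_ge r (n + 1) false n hjn; omega
        have hrec : ((PySem.List.enumerate r (n + 1)).filter
            (fun p => !decide (p.1 ∈ S) && !(PySem.Str.strip p.2 == ""))).map (·.2)
            = specCollect false r := by
          apply ih (n + 1) false S
          intro j hj
          have h := hS j (by omega)
          constructor
          · intro hjS
            rcases h.mp hjS with ⟨_, hje⟩ | hjn
            · omega
            · simpa [newB, hk] using hjn
          · intro hjn
            exact h.mpr (Or.inr (by simpa [newB, hk] using hjn))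
        by_cases hs : PySem.Str.strip l = ""
        · have hc : (!decide (((n : Int), l).1 ∈ S) && !(PySem.Str.strip ((n : Int), l).2 == "")) = false := by
            simp [hs]
          rw [hc]
          simp only [Bool.false_eq_true, if_false]
          rw [hrec]
          simp [specCollect, hk, hs]
        · have hc : (!decide (((n : Int), l).1 ∈ S) && !(PySem.Str.strip ((n : Int), l).2 == "")) = true := by
            simp [hn, hs]
          rw [hc]
          simp only [if_true, List.map_cons]
          rw [hrec]
          simp [specCollect, hk, hs]

-- ===== VERDICT (by name: the statement is the Claim_ definition above) =====
theorem shorten_response_py_spec : Claim_equal_shorten_response_py := by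
  intro response _
  unfold Spec_shorten_response_py shorten_response_py shorten_response_py_alt
  set ls := (PySem.Str.split? response "\n").getD [] with hls
  have hmark : (PySem.List.enumerate ls 0).foldl bMarkStep PySem.Set.empty = newB 0 false ls := by
    simpa [PySem.Set.empty] using
      markFold_eq ls 0 false [] (by simp) (by simp)
  have hpred : (fun p : Int × String =>
        !PySem.Set.contains (newB 0 false ls) p.1 && !(PySem.Str.strip p.2 == ""))
      = (fun p : Int × String => !decide (p.1 ∈ newB 0 false ls) && !(PySem.Str.strip p.2 == "")) := by
    funext p; simp
  have hfilter := filterB_eq ls 0 false (newB 0 false ls) (fun j _ => by simp)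
  simp only [hmark, hpred, hfilter, foldA_eq, List.nil_append]
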